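-- pv_equiv track=rewrite | github.com/jordy87535/HeyBrain | main.py | split_and_format_paragraph
-- ===== SOURCE A (Python) =====
-- import string
--
-- def split_and_format_paragraph(paragraph):
--     def remove_x(word):
--         # check if the last char is a closing square bracket
--         l,r = len(word), len(word)
--         for ind, i in enumerate(word):
--             if i not in string.punctuation:
--                 l = min(l, ind)
--             if i in string.punctuation:
--                 if l != r:
--                     r = ind
--                     break
--         return word[l:r]
--
--
--     # Split the paragraph into words
--     words = paragraph.split()
--     formatted_words = []
--
--     for word in words:
--         # Convert the word to lowercase and remove punctuation from the end
--
--
--         formatted_word = remove_x(word)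
--         formatted_word = formatted_word.lower().rstrip(string.punctuation)
--         if formatted_word not in ["", " ", "p", "pp", "ng"] and not formatted_word.isdigit():
--             formatted_words.append(formatted_word)
--
--     return formatted_words
-- ===== SOURCE B (Python) =====
-- import string
--
-- _PUNCT = frozenset(string.punctuation)
-- _SKIP = frozenset(["", " ", "p", "pp", "ng"])
--
--
-- def _core(word):
--     # leading punctuation dropped, then the run of characters up to the next punctuation
--     kept = []
--     for c in word.lstrip(string.punctuation):
--         if c in _PUNCT:
--             break
--         kept.append(c)
--     return "".join(kept)
--
--
-- def split_and_format_paragraph(paragraph):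
--     cleaned = [_core(word).lower() for word in paragraph.split()]
--     return [w for w in cleaned if w not in _SKIP and not w.isdigit()]
-- ===== Notes on version B (the rewrite author's own statement) =====
-- stated objective: idiomatic
-- what changed: Replaces the index/min/break state machine plus slice and the redundant rstrip with lstrip + a take-until-punctuation scan per word, and the foldl-append loop with comprehensions (map then filter); the dropped rstrip pass and simpler per-word scan also make B measurably faster by a constant factor.
import Mathlib
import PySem

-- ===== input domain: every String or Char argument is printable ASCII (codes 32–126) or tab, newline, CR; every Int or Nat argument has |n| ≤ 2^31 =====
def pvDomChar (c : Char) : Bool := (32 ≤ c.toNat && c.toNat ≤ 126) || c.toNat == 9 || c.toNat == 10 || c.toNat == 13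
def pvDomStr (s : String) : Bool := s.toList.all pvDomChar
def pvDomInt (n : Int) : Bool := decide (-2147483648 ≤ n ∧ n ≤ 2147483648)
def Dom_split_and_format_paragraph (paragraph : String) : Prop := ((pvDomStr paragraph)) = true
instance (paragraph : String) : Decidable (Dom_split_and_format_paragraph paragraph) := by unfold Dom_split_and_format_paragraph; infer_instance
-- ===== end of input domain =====

-- B replaces A's index/min/break state machine + slice + redundant rstrip by lstrip-then-take-until-punctuation per word, and the append loop by map/filter comprehensions (idiomatic; a timing run measured a constant-factor speedup).

-- ===== PORT A =====
-- string.punctuation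
def pvPunct : List Char := ['!','"','#','$','%','&','\'','(',')','*','+',',','-','.','/',':',';','<','=','>','?','@','[','\\',']','^','_','`','{','|','}','~']
-- 'c in string.punctuation'
def pvIsPunct (c : Char) : Bool := pvPunct.contains c

-- the 'for ind, i in enumerate(word)' loop of remove_x, with its l/r state and break
def pvRemoveXLoop (cs : List Char) (ind l r : Nat) : Nat × Nat :=
  match cs with
  | [] => (l, r)
  | c :: rest =>
    let l' := if !pvIsPunct c then min l ind else l
    if pvIsPunct c then
      (if l' ≠ r then (l', ind) else pvRemoveXLoop rest (ind + 1) l' r)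
    else pvRemoveXLoop rest (ind + 1) l' r

-- remove_x(word): run the loop from l = r = len(word), return word[l:r]
def pvRemoveX (w : List Char) : List Char :=
  let lr := pvRemoveXLoop w 0 w.length w.length
  PySem.List.slice w (some (lr.1 : Int)) (some (lr.2 : Int))

-- hand port of str.rstrip(string.punctuation): drop trailing chars of the set (exact)
def pvRstripPunct (s : List Char) : List Char := (s.reverse.dropWhile pvIsPunct).reverse

-- the literal filter list ["", " ", "p", "pp", "ng"]
def pvSkip : List (List Char) := [[], [' '], ['p'], ['p','p'], ['n','g']]

def split_and_format_paragraph (paragraph : String) : List String :=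
  (PySem.Str.split₀ paragraph).foldl (fun acc word =>
    let fw := pvRstripPunct (PySem.Chars.lower (pvRemoveX word.toList))
    if !pvSkip.contains fw && !PySem.Chars.strIsdigit fw then acc ++ [String.ofList fw] else acc) []

-- ===== PORT B =====
-- the for/break/append loop of _core over the lstripped word ("".join of the kept chars)
def pvTakeRun : List Char → List Char
  | [] => []
  | c :: rest => if pvIsPunct c then [] else c :: pvTakeRun rest

-- _core(word): word.lstrip(string.punctuation) is dropWhile (exact), then the kept run
def pvCore (w : List Char) : List Char := pvTakeRun (w.dropWhile pvIsPunct)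

def split_and_format_paragraph_alt (paragraph : String) : List String :=
  (((PySem.Str.split₀ paragraph).map (fun word => PySem.Chars.lower (pvCore word.toList))).filter
    (fun w => !pvSkip.contains w && !PySem.Chars.strIsdigit w)).map String.ofList

-- ===== PRECONDITION & SPEC =====
def Spec_split_and_format_paragraph (paragraph : String) (out : List String) : Prop := out = split_and_format_paragraph_alt paragraph
instance (paragraph : String) (out : List String) : Decidable (Spec_split_and_format_paragraph paragraph out) := by unfold Spec_split_and_format_paragraph; infer_instance

-- ===== CLAIM (what is proved, stated in full; the proofs are below) =====
def Claim_equal_split_and_format_paragraph : Prop := ∀ (paragraph : String), Dom_split_and_format_paragraph paragraph → Spec_split_and_format_paragraph paragraph (split_and_format_paragraph paragraph)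

-- ===== LEMMAS AND PROOFS =====

theorem pvTakeRun_eq (xs : List Char) : pvTakeRun xs = xs.takeWhile (fun c => !pvIsPunct c) := by
  induction xs with
  | nil => rfl
  | cons c rest ih =>
    by_cases h : pvIsPunct c <;> simp [pvTakeRun, h, ih]

-- phase 2 of remove_x's loop: a non-punct char has been seen, l is fixed and below the cursor
theorem pvLoop2 (cs : List Char) (k l n : Nat) (hln : l ≠ n) (hlk : l ≤ k) :
    pvRemoveXLoop cs k l n =
      if (cs.takeWhile (fun c => !pvIsPunct c)).length = cs.length then (l, n)
      else (l, k + (cs.takeWhile (fun c => !pvIsPunct c)).length) := by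
  induction cs generalizing k with
  | nil => simp [pvRemoveXLoop]
  | cons c rest ih =>
    by_cases h : pvIsPunct c = true
    · have hstep : pvRemoveXLoop (c :: rest) k l n = (l, k) := by
        simp [pvRemoveXLoop, h, hln]
      have htw : List.takeWhile (fun c => !pvIsPunct c) (c :: rest) = [] := by simp [h]
      rw [hstep, htw]
      simp only [List.length_nil, List.length_cons]
      rw [if_neg (by omega)]
      rw [Prod.mk.injEq]
      constructor <;> omega
    · rw [Bool.not_eq_true] at h
      have hstep : pvRemoveXLoop (c :: rest) k l n = pvRemoveXLoop rest (k + 1) (min l k) n := by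
        simp [pvRemoveXLoop, h]
      have htw : List.takeWhile (fun c => !pvIsPunct c) (c :: rest)
          = c :: rest.takeWhile (fun c => !pvIsPunct c) := by simp [h]
      rw [hstep, Nat.min_eq_left hlk, ih (k + 1) (by omega), htw]
      simp only [List.length_cons]
      by_cases ht : (rest.takeWhile (fun c => !pvIsPunct c)).length = rest.length
      · rw [if_pos ht, if_pos (by omega)]
      · rw [if_neg ht, if_neg (by omega)]
        rw [Prod.mk.injEq]
        constructor <;> omega

-- phase 1 of remove_x's loop, started at l = r = n with cursor k, k + |cs| = n
theorem pvLoop1 (cs : List Char) (k n : Nat) (hk : k + cs.length = n) :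
    pvRemoveXLoop cs k n n =
      if (cs.takeWhile pvIsPunct).length = cs.length then (n, n)
      else (k + (cs.takeWhile pvIsPunct).length,
            if ((cs.dropWhile pvIsPunct).takeWhile (fun c => !pvIsPunct c)).length
                 = (cs.dropWhile pvIsPunct).length
            then n
            else k + (cs.takeWhile pvIsPunct).length
                   + ((cs.dropWhile pvIsPunct).takeWhile (fun c => !pvIsPunct c)).length) := by
  induction cs generalizing k with
  | nil => simp [pvRemoveXLoop]
  | cons c rest ih =>
    simp only [List.length_cons] at hk
    by_cases h : pvIsPunct c = true
    · have hstep : pvRemoveXLoop (c :: rest) k n n = pvRemoveXLoop rest (k + 1) n n := by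
        simp [pvRemoveXLoop, h]
      have htw : List.takeWhile pvIsPunct (c :: rest) = c :: rest.takeWhile pvIsPunct := by
        simp [h]
      have hdw : List.dropWhile pvIsPunct (c :: rest) = rest.dropWhile pvIsPunct := by
        simp [h]
      rw [hstep, ih (k + 1) (by omega), htw, hdw]
      simp only [List.length_cons]
      by_cases hall : (rest.takeWhile pvIsPunct).length = rest.length
      · have hall' : (rest.takeWhile pvIsPunct).length + 1 = rest.length + 1 := by omega
        rw [if_pos hall, if_pos hall']
      · have hall' : ¬((rest.takeWhile pvIsPunct).length + 1 = rest.length + 1) := by omega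
        rw [if_neg hall, if_neg hall']
        by_cases ht : ((rest.dropWhile pvIsPunct).takeWhile (fun c => !pvIsPunct c)).length
            = (rest.dropWhile pvIsPunct).length
        · rw [if_pos ht, if_pos ht]
          rw [Prod.mk.injEq]
          constructor <;> omega
        · rw [if_neg ht, if_neg ht]
          rw [Prod.mk.injEq]
          constructor <;> omega
    · rw [Bool.not_eq_true] at h
      have hkn : k < n := by omega
      have hstep : pvRemoveXLoop (c :: rest) k n n = pvRemoveXLoop rest (k + 1) (min n k) n := by
        simp [pvRemoveXLoop, h]
      have htw : List.takeWhile pvIsPunct (c :: rest) = [] := by simp [h]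
      have hdw : List.dropWhile pvIsPunct (c :: rest) = c :: rest := by simp [h]
      have htw2 : List.takeWhile (fun c => !pvIsPunct c) (c :: rest)
          = c :: rest.takeWhile (fun c => !pvIsPunct c) := by simp [h]
      rw [hstep, Nat.min_eq_right (by omega), pvLoop2 rest (k + 1) k n (by omega) (by omega),
        htw, hdw, htw2]
      simp only [List.length_nil, List.length_cons]
      have hz : ¬((0 : Nat) = rest.length + 1) := by omega
      rw [if_neg hz]
      by_cases ht : (rest.takeWhile (fun c => !pvIsPunct c)).length = rest.length
      · have ht' : (rest.takeWhile (fun c => !pvIsPunct c)).length + 1 = rest.length + 1 := by omega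
        rw [if_pos ht, if_pos ht']
        rw [Prod.mk.injEq]
        constructor <;> omega
      · have ht' : ¬((rest.takeWhile (fun c => !pvIsPunct c)).length + 1 = rest.length + 1) := by omega
        rw [if_neg ht, if_neg ht']
        rw [Prod.mk.injEq]
        constructor <;> omega

theorem pvRemoveX_eq (w : List Char) : pvRemoveX w = pvCore w := by
  unfold pvRemoveX pvCore
  rw [pvTakeRun_eq]
  have hsplit : w.takeWhile pvIsPunct ++ w.dropWhile pvIsPunct = w := List.takeWhile_append_dropWhile
  have hdsplit : (w.dropWhile pvIsPunct).takeWhile (fun c => !pvIsPunct c)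
        ++ (w.dropWhile pvIsPunct).dropWhile (fun c => !pvIsPunct c) = w.dropWhile pvIsPunct :=
    List.takeWhile_append_dropWhile
  have hlen : (w.takeWhile pvIsPunct).length + (w.dropWhile pvIsPunct).length = w.length := by
    have := congrArg List.length hsplit
    rwa [List.length_append] at this
  have hdrop : w.drop (w.takeWhile pvIsPunct).length = w.dropWhile pvIsPunct := by
    have h := List.drop_left (l₁ := w.takeWhile pvIsPunct) (l₂ := w.dropWhile pvIsPunct)
    rwa [hsplit] at h
  by_cases hall : (w.takeWhile pvIsPunct).length = w.length
  · have hd : w.dropWhile pvIsPunct = [] := List.eq_nil_of_length_eq_zero (by omega)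
    have hres : pvRemoveXLoop w 0 w.length w.length = (w.length, w.length) := by
      rw [pvLoop1 w 0 w.length (by omega), if_pos hall]
    rw [hres, hd, List.takeWhile_nil]
    rw [PySem.List.slice_natCast]
    simp
  · by_cases ht : ((w.dropWhile pvIsPunct).takeWhile (fun c => !pvIsPunct c)).length
        = (w.dropWhile pvIsPunct).length
    · have hres : pvRemoveXLoop w 0 w.length w.length
          = ((w.takeWhile pvIsPunct).length, w.length) := by
        rw [pvLoop1 w 0 w.length (by omega), if_neg hall, if_pos ht]
        simp
      rw [hres, PySem.List.slice_natCast, hdrop]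
      have hfull : (w.dropWhile pvIsPunct).takeWhile (fun c => !pvIsPunct c)
          = w.dropWhile pvIsPunct := by
        have h0 : ((w.dropWhile pvIsPunct).dropWhile (fun c => !pvIsPunct c)).length = 0 := by
          have := congrArg List.length hdsplit
          rw [List.length_append] at this
          omega
        have h0' := List.eq_nil_of_length_eq_zero h0
        conv_rhs => rw [← hdsplit, h0', List.append_nil]
      rw [hfull, List.take_of_length_le (by omega)]
    · have hres : pvRemoveXLoop w 0 w.length w.length
          = ((w.takeWhile pvIsPunct).length,
             (w.takeWhile pvIsPunct).length
               + ((w.dropWhile pvIsPunct).takeWhile (fun c => !pvIsPunct c)).length) := by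
        rw [pvLoop1 w 0 w.length (by omega), if_neg hall, if_neg ht]
        simp
      rw [hres, PySem.List.slice_natCast, hdrop]
      have harith : (w.takeWhile pvIsPunct).length
            + ((w.dropWhile pvIsPunct).takeWhile (fun c => !pvIsPunct c)).length
            - (w.takeWhile pvIsPunct).length
          = ((w.dropWhile pvIsPunct).takeWhile (fun c => !pvIsPunct c)).length := by omega
      rw [harith]
      have h := List.take_left
        (l₁ := (w.dropWhile pvIsPunct).takeWhile (fun c => !pvIsPunct c))
        (l₂ := (w.dropWhile pvIsPunct).dropWhile (fun c => !pvIsPunct c))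
      rwa [hdsplit] at h

theorem pvPunct_range_false (c : Char) (h1 : 97 ≤ c.toNat) (h2 : c.toNat ≤ 122) :
    pvIsPunct c = false := by
  simp only [pvIsPunct, pvPunct, List.contains_eq_mem, decide_eq_false_iff_not, List.mem_cons,
    List.not_mem_nil, or_false]
  rintro (rfl|rfl|rfl|rfl|rfl|rfl|rfl|rfl|rfl|rfl|rfl|rfl|rfl|rfl|rfl|rfl|rfl|rfl|rfl|rfl|rfl|rfl|rfl|rfl|rfl|rfl|rfl|rfl|rfl|rfl|rfl|rfl) <;> revert h1 h2 <;> decide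

theorem pvLower_nonpunct (c : Char) (h : pvIsPunct c = false) :
    pvIsPunct (PySem.Chars.lowerChar c) = false := by
  unfold PySem.Chars.lowerChar PySem.Chars.isupper
  split
  · rename_i hu
    simp only [Bool.and_eq_true, decide_eq_true_eq, Char.le_def] at hu
    have h1 : 65 ≤ c.toNat := hu.1
    have h2 : c.toNat ≤ 90 := hu.2
    have hv : (Char.ofNat (c.toNat + 32)).toNat = c.toNat + 32 := by
      rw [Char.toNat_ofNat, if_pos]; exact Or.inl (by omega)
    exact pvPunct_range_false _ (by omega) (by omega)
  · exact h

theorem pvDropWhile_of_all_false {p : Char → Bool} (l : List Char)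
    (h : ∀ c ∈ l, p c = false) : l.dropWhile p = l := by
  cases l with
  | nil => rfl
  | cons c rest => rw [List.dropWhile_cons, if_neg (by simp [h c (List.mem_cons_self)])]

theorem pvRstrip_core (w : List Char) :
    pvRstripPunct (PySem.Chars.lower (pvCore w)) = PySem.Chars.lower (pvCore w) := by
  unfold pvRstripPunct
  rw [pvDropWhile_of_all_false, List.reverse_reverse]
  intro c hc
  rw [List.mem_reverse] at hc
  unfold PySem.Chars.lower at hc
  obtain ⟨d, hd, rfl⟩ := List.mem_map.mp hc
  apply pvLower_nonpunct
  rw [pvCore, pvTakeRun_eq] at hd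
  have := List.mem_takeWhile_imp hd
  simpa using this

-- the two pipelines over the word list agree once the per-word functions agree
theorem pvPipeline_eq (ws : List String) (acc : List String) :
    ws.foldl (fun acc word =>
      let fw := pvRstripPunct (PySem.Chars.lower (pvRemoveX word.toList))
      if !pvSkip.contains fw && !PySem.Chars.strIsdigit fw then acc ++ [String.ofList fw] else acc) acc
    = acc ++ ((ws.map (fun word => PySem.Chars.lower (pvCore word.toList))).filter
        (fun w => !pvSkip.contains w && !PySem.Chars.strIsdigit w)).map String.ofList := by
  induction ws generalizing acc with
  | nil => simp
  | cons w rest ih =>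
    have hw : pvRstripPunct (PySem.Chars.lower (pvRemoveX w.toList))
        = PySem.Chars.lower (pvCore w.toList) := by
      rw [pvRemoveX_eq, pvRstrip_core]
    rw [List.foldl_cons, ih]
    simp only [hw, List.map_cons, List.filter_cons]
    by_cases hc : PySem.Chars.lower (pvCore w.toList) ∉ pvSkip
        ∧ PySem.Chars.strIsdigit (PySem.Chars.lower (pvCore w.toList)) = false
    · simp [hc.1, hc.2]
    · simp [hc]

-- ===== VERDICT (by name: the statement is the Claim_ definition above) =====
theorem split_and_format_paragraph_spec : Claim_equal_split_and_format_paragraph := by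
  intro paragraph _
  unfold Spec_split_and_format_paragraph split_and_format_paragraph split_and_format_paragraph_alt
  rw [pvPipeline_eq]
  simp
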